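-- pv_equiv track=rewrite | github.com/mctools/ncrystal | ncrystal_python/src/NCrystal/_common.py | _hill_sort
-- ===== SOURCE A (Python) =====
-- def _hill_sort( chemform ):
--     #takes chemform like [('Al',2'),('O',3)]  and sorts in order of Hill system notation
--
--     #Remap H2/H3 and remove duplicates:
--     remap = {'H2':'D','H3':'T'}
--     if any(k in remap for k,v in chemform) or len(set(k for k,v in chemform))!=len(chemform):
--         d={}
--         for k,v in chemform:
--             k = remap.get(k,k)
--             d[k] = d.setdefault(k,0) + v
--         return _hill_sort( list(d.items()) )
--
--     has_carbon = any( en=='C' for en,c in chemform )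
--     if not has_carbon:
--         return list( sorted( chemform ) )
--     def hillsortkey( e ):
--         #if not has carbon, then all in alphabetical order
--         #first carbon, then H/D/T, then in alphabetical order
--         if e[0]=='C':
--             return ( -999999, e )
--         is_hydrogen = ( e[0] in ('H','D','T') or ( e[0].startswith('H') and e[0][1:].isdigit() ) )
--         return ( -1, e ) if is_hydrogen else (0, e )
--     return list(sorted(chemform,key=hillsortkey))
-- ===== SOURCE B (Python) =====
-- def _hill_sort(chemform):
--     # Different decomposition: remap everything up front, merge duplicates by a
--     # recursive scan-ahead (no dict, no duplicate-detection guard, no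
--     # self-recursion of the whole function), sort once plainly, then emit the
--     # Hill order as carbon/hydrogen/rest partition of that sorted list instead
--     # of a keyed sort.
--     remap = {'H2': 'D', 'H3': 'T'}
--     pairs = [(remap.get(k, k), v) for k, v in chemform]
--
--     def merge(ps):
--         if not ps:
--             return []
--         (k, v), rest = ps[0], ps[1:]
--         total = v
--         for k2, w in rest:
--             if k2 == k:
--                 total += w
--         return [(k, total)] + merge([q for q in rest if q[0] != k])
--
--     items = sorted(merge(pairs))
--     if not any(k == 'C' for k, _ in items):
--         return items
--
--     def is_h(k):
--         return k in ('H', 'D', 'T') or (k.startswith('H') and k[1:].isdigit())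
--
--     carbon = [e for e in items if e[0] == 'C']
--     hyd = [e for e in items if e[0] != 'C' and is_h(e[0])]
--     rest = [e for e in items if e[0] != 'C' and not is_h(e[0])]
--     return carbon + hyd + rest
-- ===== Notes on version B (the rewrite author's own statement) =====
-- stated objective: alternative
-- what changed: Replaced A's remap/duplicate-detection guard, dict rebuild and self-recursion, and its keyed Hill sort by: remap all keys up front, merge duplicates with a recursive scan-ahead over the list (no dict), one plain sort, then emit Hill order as a carbon/hydrogen/rest partition of that sorted list.
import Mathlib
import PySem

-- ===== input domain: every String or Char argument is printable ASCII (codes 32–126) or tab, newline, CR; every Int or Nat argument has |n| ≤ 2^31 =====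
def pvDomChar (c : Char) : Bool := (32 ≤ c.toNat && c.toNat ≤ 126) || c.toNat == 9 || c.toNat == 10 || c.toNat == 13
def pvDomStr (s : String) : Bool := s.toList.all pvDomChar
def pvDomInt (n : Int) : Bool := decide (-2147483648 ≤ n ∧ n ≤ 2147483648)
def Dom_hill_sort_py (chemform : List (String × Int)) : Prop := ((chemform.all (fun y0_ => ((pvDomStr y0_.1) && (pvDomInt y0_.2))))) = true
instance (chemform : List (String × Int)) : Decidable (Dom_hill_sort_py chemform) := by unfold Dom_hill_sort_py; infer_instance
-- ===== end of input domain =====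

-- B replaces A's "detect remap/duplicates, rebuild a dict, recurse" and its keyed sort
-- with: remap up front, merge duplicates by a recursive scan-ahead (no dict), one plain
-- sort, then a carbon/hydrogen/rest partition of the sorted list (objective: alternative).

-- ===== PORT A =====
def pvRemap : PySem.Dict String String := PySem.Dict.ofList [("H2", "D"), ("H3", "T")]

def pvIsHydrogen (s : String) : Bool :=
  (s == "H" || s == "D" || s == "T") ||
    (PySem.Str.startswith s "H" && PySem.Str.strIsdigit (PySem.Str.slice s (some 1) none))

def pvHillGroup (e : String × Int) : Int :=
  if e.1 == "C" then -999999
  else if pvIsHydrogen e.1 then -1 else 0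

-- sorted(xs, key=hillsortkey) with tuple key (group, e): exact by stability of
-- PySem.List.sorted — sort by the secondary key e = (name, count) first, then stably by group.
def pvHillSorted (xs : List (String × Int)) : List (String × Int) :=
  PySem.List.sorted (PySem.List.sorted2 xs Prod.fst Prod.snd) pvHillGroup false

-- A's loop body: k = remap.get(k, k); d[k] = d.setdefault(k, 0) + v
def pvStepA (d : PySem.Dict String Int) (p : String × Int) : PySem.Dict String Int :=
  (d.setdefault (pvRemap.getD p.1 p.1) 0).insert (pvRemap.getD p.1 p.1)
    (d.getD (pvRemap.getD p.1 p.1) 0 + p.2)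

def pvBuildA (chemform : List (String × Int)) : PySem.Dict String Int :=
  chemform.foldl pvStepA PySem.Dict.empty

-- proof-side twin of pvStepA with the setdefault simplified away (also used by the
-- termination argument of A's recursion, hence defined here)
def pvStepA' (d : PySem.Dict String Int) (p : String × Int) : PySem.Dict String Int :=
  d.insert (pvRemap.getD p.1 p.1) (d.getD (pvRemap.getD p.1 p.1) 0 + p.2)

def pvDictA (chemform : List (String × Int)) : PySem.Dict String Int :=
  chemform.foldl pvStepA' PySem.Dict.empty

def pvCondA (chemform : List (String × Int)) : Bool :=
  chemform.any (fun p => pvRemap.contains p.1) ||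
    ((PySem.Set.ofList (chemform.map Prod.fst)).length != chemform.length)

-- ---- lemmas the port needs for termination (cited in decreasing_by) ----
lemma pvRemap_eq : pvRemap = PySem.Dict.mk [("H2", "D"), ("H3", "T")] := by decide

lemma pvBeqComm (a b : String) : (a == b) = (b == a) := by
  by_cases h : a = b
  · simp [h]
  · simp [h, Ne.symm h]

lemma pvRemap_contains (k : String) : pvRemap.contains k = (k == "H2" || k == "H3") := by
  rw [pvRemap_eq]
  simp only [PySem.Dict.contains, List.any_cons, List.any_nil, Bool.or_false]
  rw [pvBeqComm "H2" k, pvBeqComm "H3" k]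

lemma pvRemap_getD (k : String) :
    pvRemap.getD k k = if k == "H2" then "D" else if k == "H3" then "T" else k := by
  by_cases h2 : k = "H2"
  · subst h2; decide
  · by_cases h3 : k = "H3"
    · subst h3; decide
    · have : pvRemap.get? k = none := by
        rw [PySem.Dict.get?_eq_none_iff_contains, pvRemap_contains]
        simp [h2, h3]
      simp [PySem.Dict.getD, this, h2, h3]

lemma pvRemap_contains_getD (k : String) : pvRemap.contains (pvRemap.getD k k) = false := by
  rw [pvRemap_getD]
  split_ifs with a b
  · rw [pvRemap_contains]; decide
  · rw [pvRemap_contains]; decide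
  · rw [pvRemap_contains]
    simp only [beq_iff_eq] at a b ⊢
    simp [a, b]

lemma pvStepA_eq_pvStepA' : pvStepA = pvStepA' := by
  funext d p
  unfold pvStepA pvStepA'
  set k := pvRemap.getD p.1 p.1 with hk
  by_cases hc : d.contains k = true
  · rw [PySem.Dict.setdefault_of_contains d 0 hc]
  · have hc' : d.contains k = false := by simpa using hc
    rw [PySem.Dict.setdefault_of_not_contains d 0 hc']
    apply PySem.Dict.ext
    have hmem : ∀ q ∈ d.items, (q.1 == k) = false := by
      intro q hq
      have := (List.any_eq_false).mp hc' q hq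
      simpa using this
    have hci : (d.insert k 0).contains k = true := by
      simp [PySem.Dict.contains_insert_self]
    rw [PySem.Dict.items_insert_of_contains _ _ hci,
        PySem.Dict.items_insert_of_not_contains _ _ hc',
        PySem.Dict.items_insert_of_not_contains _ _ hc']
    rw [List.map_append]
    congr 1
    · calc d.items.map (fun q => if q.1 == k then (k, d.getD k 0 + p.2) else q)
          = d.items.map id := List.map_congr_left (by intro q hq; simp [hmem q hq])
        _ = d.items := List.map_id _
    · simp

lemma pvDictA_keys_unremapped :
    ∀ (l : List (String × Int)) (d : PySem.Dict String Int),
      (∀ k ∈ d.keys, pvRemap.contains k = false) →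
      ∀ k ∈ (l.foldl pvStepA' d).keys, pvRemap.contains k = false := by
  intro l
  induction l with
  | nil => intro d hd; simpa using hd
  | cons p t ih =>
    intro d hd
    simp only [List.foldl_cons]
    apply ih
    intro k hk
    rcases (PySem.Dict.mem_keys_insert _ _ _ _).mp hk with h | h
    · subst h; exact pvRemap_contains_getD p.1
    · exact hd k h

lemma pvDictA_keys_nodup (l : List (String × Int)) : (pvDictA l).keys.Nodup := by
  unfold pvDictA
  exact PySem.Dict.nodup_keys_foldl_insert_key l (fun p => pvRemap.getD p.1 p.1)
    (fun d p => d.getD (pvRemap.getD p.1 p.1) 0 + p.2) PySem.Dict.empty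
    PySem.Dict.nodup_keys_empty

lemma pvCondA_pvDictA (l : List (String × Int)) : pvCondA ((pvDictA l).items) = false := by
  have hkeys : (pvDictA l).items.map Prod.fst = (pvDictA l).keys := rfl
  have hnd : ((pvDictA l).items.map Prod.fst).Nodup := by rw [hkeys]; exact pvDictA_keys_nodup l
  unfold pvCondA
  apply Bool.or_eq_false_iff.mpr
  constructor
  · apply List.any_eq_false.mpr
    intro p hp
    have hkmem : p.1 ∈ (pvDictA l).keys := PySem.Dict.mem_keys_of_mem_items _ hp
    simp [pvDictA_keys_unremapped l PySem.Dict.empty (by simp [PySem.Dict.keys_empty]) p.1 hkmem]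
  · rw [PySem.Set.ofList_eq_self_of_nodup _ hnd]
    simp

lemma pvCondA_pvBuildA (l : List (String × Int)) : pvCondA ((pvBuildA l).items) = false := by
  have : pvBuildA l = pvDictA l := by
    unfold pvBuildA pvDictA; rw [pvStepA_eq_pvStepA']
  rw [this]; exact pvCondA_pvDictA l

def hill_sort_py (chemform : List (String × Int)) : List (String × Int) :=
  if h : pvCondA chemform = true then
    -- remap H2/H3 and remove duplicates, then recurse
    hill_sort_py (pvBuildA chemform).items
  else
    let has_carbon := chemform.any (fun e => e.1 == "C")
    if !has_carbon then PySem.List.sorted2 chemform Prod.fst Prod.snd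
    else pvHillSorted chemform
termination_by (if pvCondA chemform then 1 else 0)
decreasing_by simp [pvCondA_pvBuildA, h]

-- ===== PORT B =====
-- merge(ps): take the head, scan ahead summing equal keys, drop them, recurse
def altMerge : List (String × Int) → List (String × Int)
  | [] => []
  | (k, v) :: rest =>
      (k, rest.foldl (fun t q => if q.1 == k then t + q.2 else t) v) ::
        altMerge (rest.filter (fun q => !(q.1 == k)))
termination_by l => l.length
decreasing_by
  simp only [List.length_cons, List.length_unattach]
  exact Nat.lt_succ_of_le (le_trans (List.length_filter_le _ _) (by simp))

def hill_sort_py_alt (chemform : List (String × Int)) : List (String × Int) :=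
  let pairs := chemform.map (fun p => (pvRemap.getD p.1 p.1, p.2))
  let items := PySem.List.sorted2 (altMerge pairs) Prod.fst Prod.snd
  if !(items.any (fun e => e.1 == "C")) then items
  else
    (items.filter (fun e => e.1 == "C")) ++
      (items.filter (fun e => !(e.1 == "C") && pvIsHydrogen e.1)) ++
      (items.filter (fun e => !(e.1 == "C") && !(pvIsHydrogen e.1)))

-- ===== PRECONDITION & SPEC =====
def Spec_hill_sort_py (chemform : List (String × Int)) (out : List (String × Int)) : Prop := out = hill_sort_py_alt chemform
instance (chemform : List (String × Int)) (out : List (String × Int)) : Decidable (Spec_hill_sort_py chemform out) := by unfold Spec_hill_sort_py; infer_instance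

-- ===== CLAIM (what is proved, stated in full; the proofs are below) =====
def Claim_equal_hill_sort_py : Prop := ∀ (chemform : List (String × Int)), Dom_hill_sort_py chemform → Spec_hill_sort_py chemform (hill_sort_py chemform)

-- ===== LEMMAS AND PROOFS =====
-- total value carried by key k in l
def pvSum (l : List (String × Int)) (k : String) : Int :=
  ((l.filter (fun q => q.1 == k)).map Prod.snd).sum

lemma pvFoldSum (k : String) :
    ∀ (l : List (String × Int)) (t : Int),
      l.foldl (fun t q => if q.1 == k then t + q.2 else t) t = t + pvSum l k := by
  intro l
  induction l with
  | nil => intro t; simp [pvSum]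
  | cons q r ih =>
    intro t
    by_cases h : q.1 = k
    · rw [List.foldl_cons, if_pos (by simp [h]), ih]
      have hs : pvSum (q :: r) k = q.2 + pvSum r k := by
        simp [pvSum, h]
      rw [hs]; ring
    · rw [List.foldl_cons, if_neg (by simp [h]), ih]
      have hs : pvSum (q :: r) k = pvSum r k := by
        simp [pvSum, h]
      rw [hs]

lemma pvOfListFilter (k : String) :
    ∀ (xs : List String),
      PySem.Set.ofList (xs.filter (fun s => !(s == k))) =
        (PySem.Set.ofList xs).filter (fun s => !(s == k)) := by
  intro xs
  induction xs with
  | nil => rfl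
  | cons x t ih =>
    by_cases h : x = k
    · subst h
      rw [List.filter_cons, if_neg (by simp), ih, PySem.Set.ofList_cons]
      rw [List.filter_cons, if_neg (by simp)]
      simp only [PySem.Set.discard, List.filter_filter]
      exact (List.filter_congr (by intro a _; cases hb : (a == x) <;> simp [hb])).symm
    · rw [List.filter_cons, if_pos (by simp [h]), PySem.Set.ofList_cons, ih,
          PySem.Set.ofList_cons]
      rw [List.filter_cons, if_pos (by simp [h])]
      simp only [PySem.Set.discard, List.filter_filter]
      refine congrArg (x :: ·) (List.filter_congr ?_)
      intro a _
      cases h1 : (a == x) <;> cases h2 : (a == k) <;> simp [h1, h2]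

lemma pvSum_cons_self (k : String) (v : Int) (r : List (String × Int)) :
    pvSum ((k, v) :: r) k = v + pvSum r k := by
  simp [pvSum]

lemma pvSum_cons_ne (k k' : String) (v : Int) (r : List (String × Int)) (h : k ≠ k') :
    pvSum ((k, v) :: r) k' = pvSum r k' := by
  simp [pvSum, h]

lemma pvSum_filter_ne (k k' : String) (r : List (String × Int)) (h : k' ≠ k) :
    pvSum (r.filter (fun q => !(q.1 == k))) k' = pvSum r k' := by
  unfold pvSum
  rw [List.filter_filter]
  refine congrArg (fun l => (List.map Prod.snd l).sum) (List.filter_congr ?_)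
  intro q _
  by_cases hqk : q.1 = k'
  · simp [hqk, h]
  · simp [hqk]

lemma pvAltMerge_eq (l : List (String × Int)) :
    altMerge l = (PySem.Set.ofList (l.map Prod.fst)).map (fun k => (k, pvSum l k)) := by
  induction l using altMerge.induct with
  | case1 => simp [altMerge]
  | case2 k v rest ih =>
    simp only [List.unattach_filter, List.unattach_attach] at ih
    rw [altMerge, pvFoldSum, ih]
    have hfst : (rest.filter (fun q => !(q.1 == k))).map Prod.fst =
        (rest.map Prod.fst).filter (fun s => !(s == k)) := by
      rw [List.filter_map]; rfl
    rw [hfst, pvOfListFilter]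
    simp only [List.map_cons, PySem.Set.ofList_cons, PySem.Set.discard]
    refine congrArg₂ List.cons ?_ ?_
    · rw [pvSum_cons_self]
    · refine List.map_congr_left ?_
      intro k' hk'
      have hne : k' ≠ k := by
        have := (List.mem_filter.mp hk').2; simpa using this
      rw [pvSum_filter_ne _ _ _ hne, pvSum_cons_ne _ _ _ _ (Ne.symm hne)]

lemma pvDictA_getD :
    ∀ (l : List (String × Int)) (d : PySem.Dict String Int) (k : String),
      (l.foldl (fun d p => d.insert p.1 (d.getD p.1 0 + p.2)) d).getD k 0 =
        d.getD k 0 + pvSum l k := by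
  intro l
  induction l with
  | nil => intro d k; simp [pvSum]
  | cons p r ih =>
    intro d k
    rw [List.foldl_cons, ih, PySem.Dict.getD_insert]
    by_cases h : k = p.1
    · rw [if_pos h]
      have hh : pvSum (p :: r) k = p.2 + pvSum r k := by
        obtain ⟨a, b⟩ := p
        simp only at h
        rw [h]
        exact pvSum_cons_self a b r
      rw [hh, h]; ring
    · rw [if_neg h]
      have hh : pvSum (p :: r) k = pvSum r k := by
        obtain ⟨a, b⟩ := p
        exact pvSum_cons_ne a k b r (fun he => h (by simpa using he.symm))
      rw [hh]

lemma pvDictA_items (chemform : List (String × Int)) :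
    (pvDictA chemform).items =
      altMerge (chemform.map (fun p => (pvRemap.getD p.1 p.1, p.2))) := by
  set m := chemform.map (fun p => (pvRemap.getD p.1 p.1, p.2)) with hm
  have hfold : pvDictA chemform =
      m.foldl (fun d p => d.insert p.1 (d.getD p.1 0 + p.2)) PySem.Dict.empty := by
    rw [hm, List.foldl_map]; rfl
  have hkeys : (pvDictA chemform).keys = PySem.Set.ofList (m.map Prod.fst) := by
    rw [hfold]
    rw [PySem.Dict.keys_foldl_insert_key m Prod.fst
      (fun d p => d.getD p.1 0 + p.2) PySem.Dict.empty]
    rw [PySem.Dict.keys_empty, PySem.Set.update_nil_left]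
  have hnd : (pvDictA chemform).keys.Nodup := by
    rw [hfold]
    exact PySem.Dict.nodup_keys_foldl_insert_key m Prod.fst
      (fun d p => d.getD p.1 0 + p.2) PySem.Dict.empty PySem.Dict.nodup_keys_empty
  rw [PySem.Dict.items_eq_map_keys _ hnd 0, hkeys, pvAltMerge_eq]
  refine List.map_congr_left ?_
  intro k _
  rw [hfold, pvDictA_getD m PySem.Dict.empty k, PySem.Dict.getD_empty, zero_add]

lemma nodup_of_ofList_length :
    ∀ (xs : List String), (PySem.Set.ofList xs).length = xs.length → xs.Nodup := by
  intro xs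
  induction xs with
  | nil => simp
  | cons x t ih =>
    intro h
    rw [PySem.Set.ofList_cons] at h
    simp only [List.length_cons] at h
    have hle : (PySem.Set.ofList t).length ≤ t.length := PySem.Set.length_ofList_le t
    have hfl : (List.filter (fun y => !(y == x)) (PySem.Set.ofList t)).length ≤
        (PySem.Set.ofList t).length := List.length_filter_le _ _
    have hd : (List.filter (fun y => !(y == x)) (PySem.Set.ofList t)).length = t.length := by
      simpa [PySem.Set.discard] using h
    have heq : (PySem.Set.ofList t).length = t.length := by omega
    have hnx : x ∉ t := by
      intro hx
      have hx' : x ∈ PySem.Set.ofList t := (PySem.Set.mem_ofList _ _).mpr hx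
      have : (List.filter (fun y => !(y == x)) (PySem.Set.ofList t)).length <
          (PySem.Set.ofList t).length :=
        List.length_filter_lt_length_iff_exists.mpr ⟨x, hx', by simp⟩
      omega
    exact List.nodup_cons.mpr ⟨hnx, ih heq⟩

lemma pvStepA'_fresh_append :
    ∀ (l : List (String × Int)) (d : PySem.Dict String Int),
      (∀ p ∈ l, pvRemap.contains p.1 = false) → (l.map Prod.fst).Nodup →
      (∀ p ∈ l, d.contains p.1 = false) →
      (l.foldl pvStepA' d).items = d.items ++ l := by
  intro l
  induction l with
  | nil => intro d _ _ _; simp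
  | cons p t ih =>
    intro d h1 h2 h3
    obtain ⟨k, v⟩ := p
    have hr : pvRemap.contains k = false := h1 (k, v) (List.mem_cons_self)
    have hk : pvRemap.getD k k = k := by
      rw [pvRemap_contains] at hr
      rcases Bool.or_eq_false_iff.mp hr with ⟨a, b⟩
      rw [pvRemap_getD, if_neg (by simp [a]), if_neg (by simp [b])]
    have hdk : d.contains k = false := h3 (k, v) (List.mem_cons_self)
    have hgetD : d.getD k 0 = 0 := by
      have : d.get? k = none := (PySem.Dict.get?_eq_none_iff_contains d k).mpr hdk
      simp [PySem.Dict.getD, this]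
    have hstep : pvStepA' d (k, v) = PySem.Dict.mk (d.items ++ [(k, v)]) := by
      apply PySem.Dict.ext
      unfold pvStepA'
      simp only [hk]
      rw [PySem.Dict.items_insert_of_not_contains _ _ hdk, hgetD, zero_add]
    simp only [List.foldl_cons, hstep]
    rw [ih (PySem.Dict.mk (d.items ++ [(k, v)]))]
    · simp
    · intro q hq; exact h1 q (List.mem_cons_of_mem _ hq)
    · exact (List.nodup_cons.mp (by simpa using h2)).2
    · intro q hq
      have hqk : (q.1 == k) = false := by
        have : k ∉ t.map Prod.fst := (List.nodup_cons.mp (by simpa using h2)).1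
        have : q.1 ≠ k := by
          intro he; exact this (he ▸ List.mem_map_of_mem hq)
        simpa using this
      have hdq : d.contains q.1 = false := h3 q (List.mem_cons_of_mem _ hq)
      simp only [PySem.Dict.contains] at hdq ⊢
      simp [List.any_eq_false] at hdq ⊢
      have hq1 : ¬ q.1 = k := by simpa using hqk
      exact ⟨hdq, fun he => hq1 he.symm⟩

lemma pvDictA_items_id (l : List (String × Int)) (h : pvCondA l = false) :
    (pvDictA l).items = l := by
  unfold pvCondA at h
  rcases Bool.or_eq_false_iff.mp h with ⟨ha, hb⟩
  have h1 : ∀ p ∈ l, pvRemap.contains p.1 = false := by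
    intro p hp; simpa using List.any_eq_false.mp ha p hp
  have hlen : (PySem.Set.ofList (l.map Prod.fst)).length = (l.map Prod.fst).length := by
    simpa using hb
  have h2 : (l.map Prod.fst).Nodup := nodup_of_ofList_length _ hlen
  have := pvStepA'_fresh_append l PySem.Dict.empty h1 h2
    (by intro p _; exact PySem.Dict.contains_empty p.1)
  simpa [pvDictA] using this

lemma pvHillGroup_mem (e : String × Int) :
    pvHillGroup e = -999999 ∨ pvHillGroup e = -1 ∨ pvHillGroup e = 0 := by
  unfold pvHillGroup; split_ifs <;> simp

lemma pvInsertByAppend (before : (String × Int) → (String × Int) → Bool) (x : String × Int) :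
    ∀ (L M : List (String × Int)), (∀ y ∈ L, before x y = false) →
      (∀ y ∈ M, before x y = true) →
      PySem.List.insertBy before x (L ++ M) = L ++ [x] ++ M := by
  intro L
  induction L with
  | nil =>
    intro M _ hM
    cases M with
    | nil => rfl
    | cons m ms =>
      simp only [List.nil_append]
      rw [PySem.List.insertBy, if_pos (hM m (List.mem_cons_self))]
      rfl
  | cons y L' ih =>
    intro M hL hM
    have hy : before x y = false := hL y (List.mem_cons_self)
    rw [List.cons_append, PySem.List.insertBy, if_neg (by simp [hy]),
        ih M (fun z hz => hL z (List.mem_cons_of_mem _ hz)) hM]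
    rfl

lemma pvSortedGroup (s : List (String × Int)) :
    PySem.List.sorted s pvHillGroup false =
      s.filter (fun e => pvHillGroup e == -999999) ++
        s.filter (fun e => pvHillGroup e == -1) ++
        s.filter (fun e => pvHillGroup e == 0) := by
  rw [PySem.List.sorted_eq_foldl_insertBy]
  induction s using List.reverseRecOn with
  | nil => rfl
  | append_singleton s x ih =>
    rw [List.foldl_append, List.foldl_cons, List.foldl_nil, ih]
    have memA : ∀ y ∈ s.filter (fun e => pvHillGroup e == (-999999 : Int)),
        pvHillGroup y = -999999 := by
      intro y hy; simpa using (List.mem_filter.mp hy).2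
    have memB : ∀ y ∈ s.filter (fun e => pvHillGroup e == (-1 : Int)),
        pvHillGroup y = -1 := by
      intro y hy; simpa using (List.mem_filter.mp hy).2
    have memC : ∀ y ∈ s.filter (fun e => pvHillGroup e == (0 : Int)),
        pvHillGroup y = 0 := by
      intro y hy; simpa using (List.mem_filter.mp hy).2
    rcases pvHillGroup_mem x with hx | hx | hx
    · rw [List.append_assoc]
      rw [pvInsertByAppend _ x _ _
        (by intro y hy; simp [hx, memA y hy])
        (by intro y hy
            rcases List.mem_append.mp hy with h | h
            · simp [hx, memB y h]
            · simp [hx, memC y h])]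
      simp [List.filter_append, hx, List.append_assoc]
    · rw [pvInsertByAppend _ x _ _
        (by intro y hy
            rcases List.mem_append.mp hy with h | h
            · simp [hx, memA y h]
            · simp [hx, memB y h])
        (by intro y hy; simp [hx, memC y hy])]
      simp [List.filter_append, hx, List.append_assoc]
    · rw [← List.append_nil
        (s.filter (fun e => pvHillGroup e == (-999999 : Int)) ++
          s.filter (fun e => pvHillGroup e == (-1 : Int)) ++
          s.filter (fun e => pvHillGroup e == (0 : Int)))]
      rw [pvInsertByAppend _ x _ _
        (by intro y hy
            rcases List.mem_append.mp hy with h | h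
            · rcases List.mem_append.mp h with h2 | h2
              · simp [hx, memA y h2]
              · simp [hx, memB y h2]
            · simp [hx, memC y h])
        (by intro y hy; simp at hy)]
      simp [List.filter_append, hx, List.append_assoc]

lemma pvGroupC (e : String × Int) :
    (pvHillGroup e == -999999) = (e.1 == "C") := by
  unfold pvHillGroup
  by_cases h : e.1 = "C" <;> by_cases h2 : pvIsHydrogen e.1 = true <;> simp [h, h2]

lemma pvGroupH (e : String × Int) :
    (pvHillGroup e == -1) = (!(e.1 == "C") && pvIsHydrogen e.1) := by
  unfold pvHillGroup
  by_cases h : e.1 = "C" <;> by_cases h2 : pvIsHydrogen e.1 = true <;> simp [h, h2]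

lemma pvGroupR (e : String × Int) :
    (pvHillGroup e == 0) = (!(e.1 == "C") && !(pvIsHydrogen e.1)) := by
  unfold pvHillGroup
  by_cases h : e.1 = "C" <;> by_cases h2 : pvIsHydrogen e.1 = true <;> simp [h, h2]

-- B with its merged list named: equal to A's two branches on that list
lemma pvAltOn (chemform : List (String × Int)) :
    hill_sort_py_alt chemform =
      (let items := PySem.List.sorted2 (pvDictA chemform).items Prod.fst Prod.snd
       if !(items.any (fun e => e.1 == "C")) then items
       else pvHillSorted (pvDictA chemform).items) := by
  simp only [hill_sort_py_alt]
  rw [← pvDictA_items]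
  set items := PySem.List.sorted2 (pvDictA chemform).items Prod.fst Prod.snd with hi
  by_cases h : items.any (fun e => e.1 == "C") = true
  · rw [if_neg (by simp [h]), if_neg (by simp [h])]
    unfold pvHillSorted
    rw [← hi, pvSortedGroup]
    rw [List.filter_congr (fun e _ => pvGroupC e),
        List.filter_congr (fun e _ => pvGroupH e),
        List.filter_congr (fun e _ => pvGroupR e)]
  · have h' : (!items.any (fun e => e.1 == "C")) = true := by
      cases hb : items.any (fun e => e.1 == "C")
      · rfl
      · exact absurd hb h
    rw [if_pos h', if_pos h']

-- ===== VERDICT (by name: the statement is the Claim_ definition above) =====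
theorem hill_sort_py_spec : Claim_equal_hill_sort_py := by
  intro chemform _
  unfold Spec_hill_sort_py
  rw [hill_sort_py]
  by_cases h : pvCondA chemform = true
  · rw [dif_pos h]
    have hb : pvBuildA chemform = pvDictA chemform := by
      unfold pvBuildA pvDictA; rw [pvStepA_eq_pvStepA']
    rw [hb, hill_sort_py, dif_neg (by simp [pvCondA_pvDictA])]
    rw [pvAltOn]
    have hany : (pvDictA chemform).items.any (fun e => e.1 == "C") =
        (PySem.List.sorted2 (pvDictA chemform).items Prod.fst Prod.snd).any
          (fun e => e.1 == "C") :=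
      ((PySem.List.sorted2_perm (pvDictA chemform).items Prod.fst Prod.snd false).any_eq).symm
    simp only [hany]
  · rw [dif_neg h]
    have h' : pvCondA chemform = false := by simpa using h
    rw [pvAltOn, pvDictA_items_id chemform h']
    have hany : chemform.any (fun e => e.1 == "C") =
        (PySem.List.sorted2 chemform Prod.fst Prod.snd).any (fun e => e.1 == "C") :=
      ((PySem.List.sorted2_perm chemform Prod.fst Prod.snd false).any_eq).symm
    simp only [hany]
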